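-- pv_equiv track=rewrite | github.com/Trump0412/HyperGaussian | scripts/evaluate_public_query_protocol.py | _object_for_query
-- ===== SOURCE A (Python) =====
-- def _norm(text: str) -> str:
--     return " ".join(str(text).strip().lower().replace("-", " ").replace("_", " ").split())
--
-- def _object_for_query(query_text: str, top_level_objects: list[str]) -> str:
--     query_norm = _norm(query_text)
--     matches = [name for name in top_level_objects if name in query_norm]
--     if matches:
--         matches.sort(key=len, reverse=True)
--         return matches[0]
--     if len(top_level_objects) == 1:
--         return top_level_objects[0]
--     raise ValueError(f"Unable to infer target object for query: {query_text}")
-- ===== SOURCE B (Python) =====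
-- def _norm(text: str) -> str:
--     return " ".join(str(text).strip().lower().replace("-", " ").replace("_", " ").split())
--
-- def _object_for_query(query_text: str, top_level_objects: list[str]) -> str:
--     query_norm = _norm(query_text)
--     best = None
--     for name in top_level_objects:
--         if name in query_norm and (best is None or len(name) > len(best)):
--             best = name
--     if best is not None:
--         return best
--     if len(top_level_objects) == 1:
--         return top_level_objects[0]
--     raise ValueError(f"Unable to infer target object for query: {query_text}")
-- ===== Notes on version B (the rewrite author's own statement) =====
-- stated objective: simpler
-- what changed: Replaces building a matches list and stable-sorting it by length with a single running-best pass (strict > keeps the first longest match, matching the stable sort's tie-break).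
import Mathlib
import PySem

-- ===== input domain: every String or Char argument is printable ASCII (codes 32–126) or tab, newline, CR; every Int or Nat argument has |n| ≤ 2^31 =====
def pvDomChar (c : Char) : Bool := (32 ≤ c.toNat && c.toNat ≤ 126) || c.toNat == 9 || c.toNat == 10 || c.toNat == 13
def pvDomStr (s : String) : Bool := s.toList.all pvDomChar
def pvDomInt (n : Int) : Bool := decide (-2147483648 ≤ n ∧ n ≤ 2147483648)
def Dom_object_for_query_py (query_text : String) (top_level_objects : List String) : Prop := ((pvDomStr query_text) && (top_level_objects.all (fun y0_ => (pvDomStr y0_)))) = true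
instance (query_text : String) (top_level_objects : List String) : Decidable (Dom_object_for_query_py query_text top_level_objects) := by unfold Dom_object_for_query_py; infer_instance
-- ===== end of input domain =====

-- B replaces A's matched-list + stable reverse sort with a single running-best pass
-- (strict '>' keeps the first longest match); objective: simpler, same result.


-- ===== PORT A =====
-- _norm(text): " ".join(text.strip().lower().replace("-"," ").replace("_"," ").split())
def normPy (text : String) : String :=
  PySem.Str.join " "
    (PySem.Str.split₀
      (PySem.Str.replace
        (PySem.Str.replace (PySem.Str.lower (PySem.Str.strip text)) "-" " ")
        "_" " "))

-- literal port of A; in the branch where A raises ValueError (no match and ≠ 1 object,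
-- excluded by Pre_) the port returns "".
def object_for_query_py (query_text : String) (top_level_objects : List String) : String :=
  let query_norm := normPy query_text
  let matched := top_level_objects.filter (fun name => PySem.Str.isIn name query_norm)
  if matched.isEmpty = false then
    (PySem.List.sorted matched (fun s => PySem.Str.len s) true).headD ""
  else if top_level_objects.length == 1 then
    top_level_objects.headD ""
  else
    ""  -- A raises ValueError here (outside Pre_)

-- ===== PORT B =====
-- literal port of B: one pass keeping the best (longest, first on ties) matching name;
-- in the branch where B raises ValueError (outside Pre_) the port returns "".
def object_for_query_py_alt (query_text : String) (top_level_objects : List String) : String :=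
  let query_norm := normPy query_text
  let best := top_level_objects.foldl
    (fun best name =>
      if PySem.Str.isIn name query_norm
         && (match best with
             | none => true
             | some b => decide (PySem.Str.len b < PySem.Str.len name))
      then some name else best)
    (none : Option String)
  match best with
  | some b => b
  | none =>
    if top_level_objects.length == 1 then
      top_level_objects.headD ""
    else
      ""  -- B raises ValueError here (outside Pre_)

-- ===== PRECONDITION & SPEC =====
-- Pre_ excludes exactly the inputs where A raises ValueError: no object name occurs in
-- the normalized query and the object list does not have exactly one element.
def Pre_object_for_query_py (query_text : String) (top_level_objects : List String) : Prop :=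
  (∃ name ∈ top_level_objects, PySem.Str.isIn name (normPy query_text) = true) ∨
    top_level_objects.length = 1
instance (query_text : String) (top_level_objects : List String) : Decidable (Pre_object_for_query_py query_text top_level_objects) := by unfold Pre_object_for_query_py; infer_instance

def pvWitness_object_for_query_py : String × List String := ("Render the big-CUBE now", ["cube", "sphere"])

def Spec_object_for_query_py (query_text : String) (top_level_objects : List String) (out : String) : Prop := out = object_for_query_py_alt query_text top_level_objects
instance (query_text : String) (top_level_objects : List String) (out : String) : Decidable (Spec_object_for_query_py query_text top_level_objects out) := by unfold Spec_object_for_query_py; infer_instance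

-- ===== CLAIM (what is proved, stated in full; the proofs are below) =====
def Claim_equal_object_for_query_py : Prop := ∀ (query_text : String) (top_level_objects : List String), Dom_object_for_query_py query_text top_level_objects → Pre_object_for_query_py query_text top_level_objects → Spec_object_for_query_py query_text top_level_objects (object_for_query_py query_text top_level_objects)

-- ===== LEMMAS AND PROOFS =====

-- head of one insertBy step of the reverse sort: the incoming head survives unless the
-- new element's key is strictly greater.
theorem pv_insertBy_head (key : String → Int) (x m : String) (ys : List String) :
    (PySem.List.insertBy (fun a b => decide (key b < key a)) x (m :: ys)).head? =
      some (if key m < key x then x else m) := by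
  simp only [PySem.List.insertBy]
  split_ifs with h <;> simp_all

-- the head of the insertion-sort fold is the running strict max (first wins on ties)
theorem pv_foldl_insertBy_head (key : String → Int) (t : List String) :
    ∀ (acc : List String) (m : String), acc.head? = some m →
      (t.foldl (fun acc x => PySem.List.insertBy (fun a b => decide (key b < key a)) x acc) acc).head?
        = some (t.foldl (fun b n => if key b < key n then n else b) m) := by
  induction t with
  | nil => intro acc m h; simpa using h
  | cons x t ih =>
    intro acc m h
    cases acc with
    | nil => simp at h
    | cons a ys =>
      simp only [List.head?] at h
      injection h with h; subst h
      simp only [List.foldl_cons]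
      exact ih _ _ (pv_insertBy_head key x a ys)

-- B's guarded fold over the whole list equals an unguarded Option-fold over the matched
theorem pv_foldl_filter (qn : String) (objs : List String) :
    ∀ (b : Option String),
      objs.foldl
        (fun best name =>
          if PySem.Str.isIn name qn
             && (match best with
                 | none => true
                 | some b => decide (PySem.Str.len b < PySem.Str.len name))
          then some name else best) b
      = (objs.filter (fun name => PySem.Str.isIn name qn)).foldl
          (fun best name =>
            match best with
            | none => some name
            | some b => if PySem.Str.len b < PySem.Str.len name then some name else some b) b := by
  induction objs with
  | nil => intro b; rfl
  | cons x t ih =>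
    intro b
    by_cases hx : PySem.Str.isIn x qn = true
    · simp only [List.foldl_cons, List.filter_cons, hx, if_pos]
      rw [ih]
      congr 1
      cases b with
      | none => simp
      | some v =>
        by_cases hlt : PySem.Str.len v < PySem.Str.len x
        · simp only [hlt, decide_true, Bool.and_true, if_true]
        · simp only [hlt, decide_false, Bool.and_false, Bool.false_eq_true, if_false]
    · simp only [Bool.not_eq_true] at hx
      simp only [List.foldl_cons, List.filter_cons, hx, Bool.false_and, Bool.false_eq_true,
        if_false]
      exact ih b

-- the Option-fold from `some m` is the plain running-max fold
theorem pv_option_fold (t : List String) :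
    ∀ (m : String),
      t.foldl
        (fun best name =>
          match best with
          | none => some name
          | some b => if PySem.Str.len b < PySem.Str.len name then some name else some b)
        (some m)
      = some (t.foldl (fun b n => if PySem.Str.len b < PySem.Str.len n then n else b) m) := by
  induction t with
  | nil => intro m; rfl
  | cons x t ih =>
    intro m
    simp only [List.foldl_cons]
    by_cases h : PySem.Str.len m < PySem.Str.len x
    · simp only [h, if_true]
      exact ih _
    · simp only [h, if_false]
      exact ih _

-- ===== VERDICT (by name: the statement is the Claim_ definition above) =====
theorem object_for_query_py_spec : Claim_equal_object_for_query_py := by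
  intro query_text top_level_objects _ _
  unfold Spec_object_for_query_py object_for_query_py object_for_query_py_alt
  dsimp only
  rw [pv_foldl_filter]
  cases hm : top_level_objects.filter (fun name => PySem.Str.isIn name (normPy query_text)) with
  | nil => simp
  | cons m t =>
    simp only [List.isEmpty_cons, List.foldl_cons]
    rw [pv_option_fold]
    rw [PySem.List.sorted_rev_eq_foldl_insertBy]
    simp only [List.foldl_cons]
    have h := pv_foldl_insertBy_head (fun s => PySem.Str.len s) t
      (PySem.List.insertBy (fun a b => decide (PySem.Str.len b < PySem.Str.len a)) m []) m (by rfl)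
    simp only [List.headD_eq_head?_getD, h]
    rfl
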